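-- pv_equiv track=rewrite | github.com/rgamici/covid-piracicaba | covid.py | acumulados
-- ===== SOURCE A (Python) =====
-- def acumulados(data, conf):
--     """ Calcula o total acumulado dos dados
--     Parametros:
--     -----------
--     data: lista de dias
--     conf: lista de casos
--     """
--     dia = data[0]
--     acc = [0]
--     for i in range(len(data)):
--         if data[i] == dia:
--             acc[-1] += conf[i]
--         else:
--             acc.append(acc[-1] + conf[i])
--     return(acc)
-- ===== SOURCE B (Python) =====
-- def acumulados(data, conf):
--     """Same result as A: prefix-sum table + closed-form boundary selection."""
--     dia = data[0]
--     n = len(data)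
--     prefix = [0]
--     total = 0
--     for i in range(n):
--         total += conf[i]
--         prefix.append(total)
--     return [prefix[b] for b in range(n) if data[b] != dia] + [prefix[n]]
-- ===== Notes on version B (the rewrite author's own statement) =====
-- stated objective: alternative
-- what changed: B builds a prefix-sum table once and then selects, in closed form, the prefix value at each index whose day differs from data[0] plus the grand total, replacing A's single loop that mutates the last element of a growing accumulator.
import Mathlib
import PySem

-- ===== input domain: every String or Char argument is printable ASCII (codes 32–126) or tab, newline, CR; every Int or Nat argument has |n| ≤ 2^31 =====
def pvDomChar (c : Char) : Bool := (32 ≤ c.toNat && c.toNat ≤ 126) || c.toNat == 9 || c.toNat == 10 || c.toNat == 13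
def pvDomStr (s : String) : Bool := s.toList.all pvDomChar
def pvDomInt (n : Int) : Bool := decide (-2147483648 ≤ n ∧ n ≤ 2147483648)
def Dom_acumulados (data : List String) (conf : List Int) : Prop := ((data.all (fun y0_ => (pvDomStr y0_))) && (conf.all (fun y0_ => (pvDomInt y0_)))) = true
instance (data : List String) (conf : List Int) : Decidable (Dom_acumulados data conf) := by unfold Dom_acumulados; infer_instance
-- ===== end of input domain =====

-- B replaces A's accumulator-mutating loop by a prefix-sum table plus a closed-form
-- selection of boundary prefixes (objective: alternative decomposition, same cost).

-- ===== PORT A =====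
-- A's acc is modelled as (front, last): acc[-1] += c ↦ last + c; acc.append(x) ↦ front ++ [last].
def acumulados (data : List String) (conf : List Int) : List Int :=
  -- dia = data[0]; Pre_ requires data ≠ []
  match (List.range data.length).foldl
    (fun (st : List Int × Int) i =>
      if data.getD i "" == data.getD 0 "" then (st.1, st.2 + conf.getD i 0)
      else (st.1 ++ [st.2], st.2 + conf.getD i 0))
    ([], 0) with
  | (front, last) => front ++ [last]

-- ===== PORT B =====
def acumulados_alt (data : List String) (conf : List Int) : List Int :=
  -- dia = data[0]; Pre_ requires data ≠ []
  match (List.range data.length).foldl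
    (fun (st : List Int × Int) i =>
      (st.1 ++ [st.2 + conf.getD i 0], st.2 + conf.getD i 0))
    ([(0 : Int)], 0) with
  | (pl, _) =>
    ((List.range data.length).filter (fun b => data.getD b "" != data.getD 0 "")).map
      (fun b => pl.getD b 0) ++ [pl.getD data.length 0]

-- ===== PRECONDITION & SPEC =====
-- Pre_ excludes exactly the inputs on which Python A raises IndexError:
-- empty data (data[0]) and conf shorter than data (conf[i]).
def Pre_acumulados (data : List String) (conf : List Int) : Prop :=
  data ≠ [] ∧ data.length ≤ conf.length
instance (data : List String) (conf : List Int) : Decidable (Pre_acumulados data conf) := by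
  unfold Pre_acumulados; infer_instance
def pvWitness_acumulados : List String × List Int := (["a", "a", "b"], [1, 2, 3])

def Spec_acumulados (data : List String) (conf : List Int) (out : List Int) : Prop := out = acumulados_alt data conf
instance (data : List String) (conf : List Int) (out : List Int) : Decidable (Spec_acumulados data conf out) := by unfold Spec_acumulados; infer_instance

-- ===== CLAIM (what is proved, stated in full; the proofs are below) =====
def Claim_equal_acumulados : Prop := ∀ (data : List String) (conf : List Int), Dom_acumulados data conf → Pre_acumulados data conf → Spec_acumulados data conf (acumulados data conf)

-- ===== LEMMAS AND PROOFS =====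

-- prefix sum of conf over the first k positions (getD-based, like both ports)
def pvP (conf : List Int) (k : Nat) : Int :=
  ((List.range k).map (fun i => conf.getD i 0)).sum

theorem pvP_zero (conf : List Int) : pvP conf 0 = 0 := by simp [pvP]

theorem pvP_succ (conf : List Int) (k : Nat) :
    pvP conf (k + 1) = pvP conf k + conf.getD k 0 := by
  simp [pvP, List.range_succ]

theorem pvA_inv (data : List String) (conf : List Int) (dia : String) (n : Nat) :
    (List.range n).foldl
      (fun (st : List Int × Int) i =>
        if data.getD i "" == dia then (st.1, st.2 + conf.getD i 0)
        else (st.1 ++ [st.2], st.2 + conf.getD i 0))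
      ([], 0)
    = (((List.range n).filter (fun b => data.getD b "" != dia)).map (pvP conf), pvP conf n) := by
  induction n with
  | zero => simp [pvP_zero]
  | succ n ih =>
    rw [List.range_succ, List.foldl_append, ih, List.filter_append, List.map_append]
    by_cases h : data[n]?.getD "" = dia
    · simp [List.getD, h, pvP_succ]
    · simp [List.getD, h, pvP_succ]

theorem pvB_inv (conf : List Int) (n : Nat) :
    (List.range n).foldl
      (fun (st : List Int × Int) i =>
        (st.1 ++ [st.2 + conf.getD i 0], st.2 + conf.getD i 0))
      ([(0 : Int)], 0)
    = ((List.range (n + 1)).map (pvP conf), pvP conf n) := by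
  induction n with
  | zero => simp [pvP_zero]
  | succ n ih =>
    rw [List.range_succ, List.foldl_append, ih]
    rw [List.range_succ (n := n + 1), List.map_append]
    simp [pvP_succ]

theorem pvMapRange_getD (f : Nat → Int) (m k : Nat) (h : k < m) :
    ((List.range m).map f).getD k 0 = f k := by
  rw [List.getD_eq_getElem?_getD]
  simp [h]

-- ===== VERDICT (by name: the statement is the Claim_ definition above) =====
theorem acumulados_spec : Claim_equal_acumulados := by
  intro data conf _ _
  unfold Spec_acumulados acumulados acumulados_alt
  rw [pvA_inv data conf (data.getD 0 "") data.length, pvB_inv conf data.length]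
  dsimp only
  congr 1
  · apply List.map_congr_left
    intro b hb
    have hbn : b < data.length := List.mem_range.mp (List.mem_filter.mp hb).1
    rw [pvMapRange_getD (pvP conf) (data.length + 1) b (by omega)]
  · rw [pvMapRange_getD (pvP conf) (data.length + 1) data.length (by omega)]
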